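-- pv_equiv track=rewrite | github.com/fedora-conary/rmake-2 | testsuite.py | sortTests
-- ===== SOURCE A (Python) =====
-- def sortTests(tests):
--     order = {'smoketest': 0,
--              'unit_test' :1,
--              'functionaltest':2}
--     maxNum = len(order)
--     tests = [ (test, test.index('test')) for test in tests]
--     tests = sorted((order.get(test[:index+4], maxNum), test)
--                    for (test, index) in tests)
--     tests = [ x[1] for x in tests if x[1].startswith('rmake_test') ]
--     return tests
-- ===== SOURCE B (Python) =====
-- def sortTests(tests):
--     # Every name that starts with 'rmake_test' has its first 'test' at index 6,
--     # so its category prefix is 'rmake_test', which is never an order key: all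
--     # surviving names share the overflow category and sort purely by name.
--     return sorted(t for t in tests if t.startswith('rmake_test'))
-- ===== Notes on version B (the rewrite author's own statement) =====
-- stated objective: simpler
-- what changed: B drops the category-key machinery entirely: every name that survives the startswith('rmake_test') filter has its first 'test' at index 6, so its prefix 'rmake_test' is never an order key and all survivors share the overflow category; B therefore filters first and sorts only the survivors by name.
import Mathlib
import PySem

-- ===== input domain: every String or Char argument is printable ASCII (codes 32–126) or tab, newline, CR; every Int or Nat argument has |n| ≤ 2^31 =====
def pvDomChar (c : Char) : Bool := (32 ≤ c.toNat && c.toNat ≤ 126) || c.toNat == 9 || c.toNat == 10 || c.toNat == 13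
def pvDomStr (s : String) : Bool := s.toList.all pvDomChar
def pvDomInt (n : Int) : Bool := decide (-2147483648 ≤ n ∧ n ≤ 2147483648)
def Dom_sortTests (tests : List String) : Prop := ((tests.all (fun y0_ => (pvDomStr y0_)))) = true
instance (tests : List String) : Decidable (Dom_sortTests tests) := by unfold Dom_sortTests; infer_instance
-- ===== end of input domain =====

-- B replaces A's compound-key sort of every name by a plain filter-then-sort of the
-- surviving names (simpler; same results — all survivors share the overflow category).

-- ===== PORT A =====
def sortTests (tests : List String) : List String :=
  let order : PySem.Dict String Int :=
    ((PySem.Dict.empty.insert "smoketest" 0).insert "unit_test" 1).insert "functionaltest" 2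
  let maxNum : Int := (order.keys.length : Int)
  -- test.index('test') raises ValueError when 'test' is absent — exactly the inputs
  -- Pre_sortTests excludes; on admitted inputs PySem.Str.find equals str.index.
  let tests1 : List (String × Int) :=
    tests.map (fun test => (test, PySem.Str.find test "test"))
  let tests2 : List (Int × String) :=
    PySem.List.sorted2
      (tests1.map (fun ti => (order.getD (PySem.Str.slice ti.1 none (some (ti.2 + 4))) maxNum, ti.1)))
      (fun x => x.1) (fun x => x.2) false
  (tests2.filter (fun x => PySem.Str.startswith x.2 "rmake_test")).map (fun x => x.2)

-- ===== PORT B =====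
def sortTests_alt (tests : List String) : List String :=
  PySem.List.sorted (tests.filter (fun t => PySem.Str.startswith t "rmake_test")) (fun x => x) false

-- ===== PRECONDITION & SPEC =====
-- Pre_ excludes exactly the inputs on which Python A raises ValueError: some name
-- without the substring 'test' (test.index('test') fails there, filtered-out names included).
def Pre_sortTests (tests : List String) : Prop :=
  ∀ t ∈ tests, PySem.Str.isIn "test" t = true
instance (tests : List String) : Decidable (Pre_sortTests tests) := by
  unfold Pre_sortTests; infer_instance
def pvWitness_sortTests : List String := ["rmake_test_b", "rmake_test_a", "smoketest_x"]

def Spec_sortTests (tests : List String) (out : List String) : Prop := out = sortTests_alt tests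
instance (tests : List String) (out : List String) : Decidable (Spec_sortTests tests out) := by
  unfold Spec_sortTests; infer_instance

-- ===== CLAIM (what is proved, stated in full; the proofs are below) =====
def Claim_equal_sortTests : Prop :=
  ∀ (tests : List String), Dom_sortTests tests → Pre_sortTests tests →
    Spec_sortTests tests (sortTests tests)
-- ===== LEMMAS AND PROOFS =====

-- sorted2 with two keys is sorted with the lexicographic key (the comparators agree pointwise)
theorem sorted2_pairs_eq_sorted_lex (xs : List (Int × String)) :
    PySem.List.sorted2 xs (fun x => x.1) (fun x => x.2) false
      = PySem.List.sorted xs (fun x => (toLex (x.1, x.2) : Lex (Int × String))) false := by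
  rw [PySem.List.sorted_eq_foldl_insertBy]
  unfold PySem.List.sorted2
  simp only [Bool.false_eq_true, if_false]
  have hcmp : (fun (a b : Int × String) => decide (a.1 < b.1) || (!decide (b.1 < a.1) && decide (a.2 < b.2)))
      = (fun a b => decide ((toLex (a.1, a.2) : Lex (Int × String)) < toLex (b.1, b.2))) := by
    funext a b
    rcases lt_trichotomy a.1 b.1 with h | h | h
    · simp [h, Prod.Lex.lt_iff]
    · simp [h, Prod.Lex.lt_iff]
    · simp [Prod.Lex.lt_iff, lt_asymm h, h.ne']
      exact fun h' => absurd h (not_lt.mpr h')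
  rw [hcmp]

-- a name starting with 'rmake_test' always falls in the overflow category:
-- its category prefix starts with 'r', no order key does
theorem key_of_rmake (t : String) (h : PySem.Str.startswith t "rmake_test" = true) :
    (((PySem.Dict.empty.insert "smoketest" (0:Int)).insert "unit_test" 1).insert "functionaltest" 2).getD
      (PySem.Str.slice t none (some (PySem.Str.find t "test" + 4))) 3 = 3 := by
  -- prefix fact
  rw [PySem.Str.startswith_eq] at h
  rw [PySem.Chars.startswith_iff] at h
  obtain ⟨rest, hrest⟩ := h
  -- 'test' occurs in t
  have hinf : "test".toList <:+: t.toList := ⟨"rmake_".toList, rest, by rw [← hrest]; rfl⟩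
  have hf : 0 ≤ PySem.Str.find t "test" := (PySem.Str.find_nonneg_iff t "test").mpr hinf
  -- the sliced prefix starts with 'r'
  have hslice : (PySem.Str.slice t none (some (PySem.Str.find t "test" + 4))).toList
      = t.toList.take (PySem.Str.find t "test" + 4).toNat := by
    rw [PySem.Str.slice]
    rw [PySem.Chars.slice_eq_listSlice]
    rw [PySem.List.slice_to t.toList (show (0:Int) ≤ PySem.Str.find t "test" + 4 by omega)]
    simp
  have hhead : (PySem.Str.slice t none (some (PySem.Str.find t "test" + 4))).toList.head? = some 'r' := by
    rw [hslice]
    have ht : t.toList = 'r' :: ("make_test".toList ++ rest) := by rw [← hrest]; rfl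
    rw [ht]
    have : (PySem.Str.find t "test" + 4).toNat = ((PySem.Str.find t "test" + 4).toNat - 1) + 1 := by omega
    rw [this, List.take_succ_cons]
    rfl
  have hne : ∀ k : String, k.toList.head? ≠ some 'r' →
      PySem.Str.slice t none (some (PySem.Str.find t "test" + 4)) ≠ k := by
    intro k hk heq
    rw [← heq] at hk
    exact hk hhead
  rw [PySem.Dict.getD_insert_of_ne _ _ _ (hne _ (by decide))]
  rw [PySem.Dict.getD_insert_of_ne _ _ _ (hne _ (by decide))]
  rw [PySem.Dict.getD_insert_of_ne _ _ _ (hne _ (by decide))]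
  exact PySem.Dict.getD_empty _ _

-- A = B on every input: filtering the lex-sorted keyed list and dropping the (equal)
-- keys is the sorted filtered list
theorem sortTests_eq_alt (tests : List String) : sortTests tests = sortTests_alt tests := by
  unfold sortTests sortTests_alt
  simp only [List.map_map]
  rw [sorted2_pairs_eq_sorted_lex]
  set key : String → Int := fun t =>
    ((((PySem.Dict.empty.insert "smoketest" (0:Int)).insert "unit_test" 1).insert "functionaltest" 2).getD
      (PySem.Str.slice t none (some (PySem.Str.find t "test" + 4))) 3) with hkey
  set f : String → Int × String := fun t => (key t, t) with hf
  set p : String → Bool := fun t => PySem.Str.startswith t "rmake_test" with hp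
  set keyed := tests.map f with hkeyed
  set S := PySem.List.sorted keyed (fun x => (toLex (x.1, x.2) : Lex (Int × String))) false with hS
  set X := S.filter (fun x => p x.2) with hX
  show X.map (fun x => x.2) = PySem.List.sorted (tests.filter p) (fun x => x) false
  symm
  apply PySem.List.sorted_id_eq_of_perm_of_pairwise
  · -- permutation
    have h1 : S.Perm keyed := PySem.List.sorted_perm _ _ _
    have h2 : X.Perm (keyed.filter (fun x => p x.2)) := h1.filter _
    have h3 : keyed.filter (fun x => p x.2) = (tests.filter p).map f := by
      rw [hkeyed, List.filter_map]
      rfl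
    have h4 := h2.map (fun x : Int × String => x.2)
    rw [h3, List.map_map] at h4
    have h5 : List.map ((fun x : Int × String => x.2) ∘ f) (List.filter p tests) = List.filter p tests := by
      rw [hf]; simp [Function.comp_def]
    rw [h5] at h4; exact h4
  · -- sortedness
    have hS2 : S.Pairwise (fun a b => (toLex (a.1, a.2) : Lex (Int × String)) ≤ toLex (b.1, b.2)) :=
      PySem.List.sorted_pairwise _ _
    have hXp : X.Pairwise (fun a b => (toLex (a.1, a.2) : Lex (Int × String)) ≤ toLex (b.1, b.2)) :=
      hS2.sublist List.filter_sublist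
    have hm : ∀ x ∈ X, x.1 = 3 ∧ p x.2 = true := by
      intro x hx
      rw [hX, List.mem_filter] at hx
      obtain ⟨hxS, hpx⟩ := hx
      refine ⟨?_, hpx⟩
      rw [hS, PySem.List.mem_sorted, hkeyed, List.mem_map] at hxS
      obtain ⟨t, _, rfl⟩ := hxS
      exact key_of_rmake t hpx
    rw [List.pairwise_map]
    refine hXp.imp_of_mem ?_
    intro a b ha hb hab
    obtain ⟨ha3, -⟩ := hm a ha
    obtain ⟨hb3, -⟩ := hm b hb
    rw [Prod.Lex.le_iff] at hab
    rcases hab with h | ⟨-, h⟩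
    · simp only [ha3, hb3] at h
      exact absurd h (lt_irrefl _)
    · exact h

-- ===== VERDICT (by name: the statement is the Claim_ definition above) =====
theorem sortTests_spec : Claim_equal_sortTests := by
  intro tests _ _
  unfold Spec_sortTests
  exact sortTests_eq_alt tests
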